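-- pv_equiv track=rewrite | github.com/BhardwajYash18/DAA-Algorithm-Visualizer | backend/algorithms.py | _unique_labels
-- ===== SOURCE A (Python) =====
-- def _unique_labels(chars):
--     seen, labels = {}, []
--     for ch in chars:
--         if ch not in seen:
--             seen[ch] = 0
--             labels.append(ch)
--         else:
--             seen[ch] += 1
--             labels.append(f"{ch}.{seen[ch]}")
--     return labels
-- ===== SOURCE B (Python) =====
-- def _unique_labels(chars):
--     chars = list(chars)
--     pos = {}
--     for i, ch in enumerate(chars):
--         pos.setdefault(ch, []).append(i)
--     out = [""] * len(chars)
--     for ch, idxs in pos.items():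
--         out[idxs[0]] = ch
--         for k in range(1, len(idxs)):
--             out[idxs[k]] = f"{ch}.{k}"
--     return out
-- ===== Notes on version B (the rewrite author's own statement) =====
-- stated objective: alternative
-- what changed: Replaces A's single pass with a running per-char counter dict by a two-phase index-then-fill decomposition: one pass groups the positions of each char into a dict of position lists, then each group writes its labels (bare char at the first position, ch.k at the k-th repeat) into a preallocated result list.
import Mathlib
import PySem

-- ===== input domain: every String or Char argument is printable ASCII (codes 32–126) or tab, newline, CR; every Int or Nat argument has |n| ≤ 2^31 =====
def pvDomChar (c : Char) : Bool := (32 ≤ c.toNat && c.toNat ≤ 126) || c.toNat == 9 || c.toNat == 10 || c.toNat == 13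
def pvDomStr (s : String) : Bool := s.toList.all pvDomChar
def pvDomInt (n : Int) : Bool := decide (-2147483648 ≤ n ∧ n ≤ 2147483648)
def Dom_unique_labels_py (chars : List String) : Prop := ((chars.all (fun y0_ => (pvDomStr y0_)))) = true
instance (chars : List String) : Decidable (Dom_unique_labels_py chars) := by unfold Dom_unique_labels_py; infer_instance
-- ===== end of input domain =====

-- B replaces A's running-counter single pass by an index-then-fill decomposition (one pass groups
-- each char's positions into a dict of position lists, a second phase scatters the labels into a
-- preallocated result list); same O(n) cost, return value proved identical on all inputs.

-- ===== PORT A =====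
def unique_labels_py (chars : List String) : List String :=
  (chars.foldl (fun st ch =>
      if !(st.1.contains ch) then
        (st.1.insert ch 0, st.2 ++ [ch])
      else
        -- seen[ch] += 1; labels.append(f"{ch}.{seen[ch]}")
        let v : Int := st.1.getD ch 0 + 1
        (st.1.insert ch v, st.2 ++ [ch ++ "." ++ PySem.Int.toStr v])
    ) ((PySem.Dict.empty : PySem.Dict String Int), ([] : List String))).2

-- ===== PORT B =====
-- pos.setdefault(ch, []).append(i) is Dict.modify ch [] (· ++ [i]).
-- pyGetD's default 0 is never reached and pySetD never clamps: every group is nonempty and its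
-- indices come from enumerate, hence lie in [0, len(out)) (proved below), so the port is exact.
def unique_labels_py_alt (chars : List String) : List String :=
  let pos := (PySem.List.enumerate chars 0).foldl
      (fun d p => d.modify p.2 [] (fun l => l ++ [p.1]))
      (PySem.Dict.empty : PySem.Dict String (List Int))
  let out := PySem.List.pyRepeat [""] (chars.length : Int)
  pos.items.foldl (fun o q =>
      let o1 := PySem.List.pySetD o (PySem.List.pyGetD q.2 0 0) q.1
      (PySem.List.pyRange 1 (q.2.length : Int) 1).foldl
        (fun o2 k => PySem.List.pySetD o2 (PySem.List.pyGetD q.2 k 0) (q.1 ++ "." ++ PySem.Int.toStr k))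
        o1)
    out

-- ===== PRECONDITION & SPEC =====
def Spec_unique_labels_py (chars : List String) (out : List String) : Prop := out = unique_labels_py_alt chars
instance (chars : List String) (out : List String) : Decidable (Spec_unique_labels_py chars out) := by unfold Spec_unique_labels_py; infer_instance

-- ===== CLAIM (what is proved, stated in full; the proofs are below) =====
def Claim_equal_unique_labels_py : Prop := ∀ (chars : List String), Dom_unique_labels_py chars → Spec_unique_labels_py chars (unique_labels_py chars)

-- ===== LEMMAS AND PROOFS =====

def labelAt (p : List String) (ch : String) : String :=
  if p.count ch = 0 then ch else ch ++ "." ++ PySem.Int.toStr ((p.count ch : Nat) : Int)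
def bspec : List String → List String → List String
  | _, [] => []
  | p, ch :: rest => labelAt p ch :: bspec (p ++ [ch]) rest

theorem bspec_length (rest : List String) : ∀ p : List String, (bspec p rest).length = rest.length := by
  induction rest with
  | nil => intro p; simp [bspec]
  | cons ch rest ih => intro p; simp [bspec, ih]

theorem bspec_get (rest : List String) : ∀ (p : List String) (j : Nat) (hj : j < rest.length),
    (bspec p rest)[j]'((bspec_length rest p).symm ▸ hj) = labelAt (p ++ rest.take j) (rest[j]'hj) := by
  induction rest with
  | nil => intro p j hj; simp at hj
  | cons ch rest ih =>
    intro p j hj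
    cases j with
    | zero => simp [bspec]
    | succ j =>
      have hj' : j < rest.length := by simpa using hj
      have := ih (p ++ [ch]) j hj'
      simpa [bspec, List.append_assoc] using this

theorem aloop (rest : List String) : ∀ (p : List String) (seen : PySem.Dict String Int) (labels : List String),
    (∀ ch, seen.contains ch = p.contains ch) →
    (∀ ch, ch ∈ p → seen.getD ch 0 = (p.count ch : Int) - 1) →
    (rest.foldl (fun st ch =>
      if !(st.1.contains ch) then
        (st.1.insert ch 0, st.2 ++ [ch])
      else
        let v : Int := st.1.getD ch 0 + 1
        (st.1.insert ch v, st.2 ++ [ch ++ "." ++ PySem.Int.toStr v])) (seen, labels)).2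
    = labels ++ bspec p rest := by
  induction rest with
  | nil => intro p seen labels _ _; simp [bspec]
  | cons ch rest ih =>
    intro p seen labels hc hg
    by_cases hmem : ch ∈ p
    · have hcc : seen.contains ch = true := by rw [hc]; simpa using hmem
      have hv : seen.getD ch 0 + 1 = ((p.count ch : Nat) : Int) := by
        have := hg ch hmem
        have hpos : 0 < p.count ch := List.count_pos_iff.mpr hmem
        omega
      have hcnt : p.count ch ≠ 0 := (List.count_pos_iff.mpr hmem).ne'
      simp only [List.foldl_cons, hcc, Bool.not_true, Bool.false_eq_true, if_false]
      rw [ih (p ++ [ch]) _ _ ?_ ?_]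
      · simp [bspec, labelAt, hcnt, hv, List.append_assoc]
      · intro x
        rw [PySem.Dict.contains_insert, hc]
        by_cases hx : x = ch <;> simp [hx, hmem]
      · intro x hx
        by_cases hxch : x = ch
        · subst hxch
          rw [PySem.Dict.getD_insert_self]
          have h1 : (p ++ [x]).count x = p.count x + 1 := by simp
          rw [h1]; push_cast; omega
        · have hxp : x ∈ p := by
            rcases List.mem_append.mp hx with h | h
            · exact h
            · simp at h; exact absurd h hxch
          rw [PySem.Dict.getD_insert_of_ne _ _ _ hxch]
          have h1 : (p ++ [ch]).count x = p.count x := by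
            simp [Ne.symm hxch]
          rw [h1]; exact hg x hxp
    · have hcc : seen.contains ch = false := by
        rw [hc]; simpa using hmem
      simp only [List.foldl_cons, hcc, Bool.not_false, if_true]
      rw [ih (p ++ [ch]) _ _ ?_ ?_]
      · have hcnt : p.count ch = 0 := List.count_eq_zero.mpr hmem
        simp [bspec, labelAt, hcnt, List.append_assoc]
      · intro x
        rw [PySem.Dict.contains_insert, hc]
        by_cases hx : x = ch <;> simp [hx]
      · intro x hx
        by_cases hxch : x = ch
        · subst hxch
          rw [PySem.Dict.getD_insert_self]
          have h1 : (p ++ [x]).count x = p.count x + 1 := by simp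
          have h0 : p.count x = 0 := List.count_eq_zero.mpr hmem
          rw [h1, h0]; simp
        · have hxp : x ∈ p := by
            rcases List.mem_append.mp hx with h | h
            · exact h
            · simp at h; exact absurd h hxch
          rw [PySem.Dict.getD_insert_of_ne _ _ _ hxch]
          have h1 : (p ++ [ch]).count x = p.count x := by
            simp [Ne.symm hxch]
          rw [h1]; exact hg x hxp

-- ===== B side =====
def occIdx (chars : List String) (ch : String) : List Int :=
  ((PySem.List.enumerate chars 0).filter (fun p => p.2 == ch)).map (fun p => p.1)

def occP (chars : List String) (ch : String) : List Nat :=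
  (List.range chars.length).filter (fun t => chars[t]? == some ch)

theorem occP_snoc (ys : List String) (x ch : String) :
    occP (ys ++ [x]) ch = occP ys ch ++ (if x = ch then [ys.length] else []) := by
  unfold occP
  rw [List.length_append, List.length_singleton, List.range_succ, List.filter_append]
  congr 1
  · apply List.filter_congr
    intro t ht
    rw [List.getElem?_append_left (by simpa using ht)]
  · rw [List.filter_singleton]
    by_cases hx : x = ch
    · simp [hx]
    · have hb : ((ys ++ [x])[ys.length]? == some ch) = false := by
        simp [hx]
      rw [hb]
      simp [hx]

theorem occP_length (chars : List String) (ch : String) :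
    (occP chars ch).length = chars.count ch := by
  induction chars using List.reverseRecOn with
  | nil => simp [occP]
  | append_singleton ys x ih =>
    rw [occP_snoc]
    by_cases hx : x = ch
    · simp [hx, List.count_append, ih]
    · simp [hx, List.count_append, ih]

theorem occIdx_snoc (ys : List String) (x ch : String) :
    occIdx (ys ++ [x]) ch = occIdx ys ch ++ (if x = ch then [(ys.length : Int)] else []) := by
  unfold occIdx
  rw [PySem.List.enumerate_append, List.filter_append, List.map_append]
  congr 1
  by_cases hx : x = ch <;> simp [PySem.List.enumerate, hx]

theorem occIdx_eq (chars : List String) (ch : String) :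
    occIdx chars ch = (occP chars ch).map (fun t => (Nat.cast t : Int)) := by
  induction chars using List.reverseRecOn with
  | nil => rfl
  | append_singleton ys x ih =>
    rw [occIdx_snoc, occP_snoc, ih]
    by_cases hx : x = ch <;> simp [hx]

theorem occP_mem_of {chars : List String} {ch : String} {j : Nat}
    (hj : j < chars.length) (hch : chars[j]? = some ch) : j ∈ occP chars ch := by
  unfold occP
  rw [List.mem_filter]
  exact ⟨by simpa using hj, by simpa using hch⟩

theorem occP_spec (chars : List String) (ch : String) :
    ∀ (k t : Nat), (occP chars ch)[k]? = some t →
      t < chars.length ∧ chars[t]? = some ch ∧ (chars.take t).count ch = k := by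
  induction chars using List.reverseRecOn with
  | nil => intro k t h; simp [occP] at h
  | append_singleton ys x ih =>
    intro k t h
    rw [occP_snoc] at h
    by_cases hkl : k < (occP ys ch).length
    · rw [List.getElem?_append_left hkl] at h
      obtain ⟨h1, h2, h3⟩ := ih k t h
      refine ⟨by simp; omega, ?_, ?_⟩
      · rw [List.getElem?_append_left h1]; exact h2
      · rw [List.take_append_of_le_length (le_of_lt h1)]; exact h3
    · rw [List.getElem?_append_right (le_of_not_gt hkl)] at h
      by_cases hx : x = ch
      · rw [if_pos hx] at h
        have hk0 : k - (occP ys ch).length = 0 ∧ t = ys.length := by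
          rcases Nat.eq_zero_or_pos (k - (occP ys ch).length) with h0 | h0
          · rw [h0] at h; simp at h; exact ⟨h0, h.symm⟩
          · rw [List.getElem?_singleton] at h
            simp [Nat.pos_iff_ne_zero.mp h0] at h
        have hk : k = (occP ys ch).length := by omega
        subst hk
        rcases hk0 with ⟨-, ht⟩
        subst ht
        refine ⟨by simp, by simp [hx], ?_⟩
        rw [List.take_append_of_le_length (le_refl _)]
        simp [occP_length]
      · rw [if_neg hx] at h; simp at h

theorem foldl_pySetD_length (r : List Int) (i : Int → Int) (v : Int → String) :
    ∀ out : List String, (r.foldl (fun o k => PySem.List.pySetD o (i k) (v k)) out).length = out.length := by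
  induction r with
  | nil => intro out; rfl
  | cons a r ih => intro out; rw [List.foldl_cons, ih, PySem.List.length_pySetD]

theorem loop_cons (L : List Nat) (g : Int → String) (a : Nat) (out : List String) (ha : a < L.length) :
    (PySem.List.pyRange (a : Int) (L.length : Int) 1).foldl
      (fun o2 k => PySem.List.pySetD o2 (PySem.List.pyGetD (L.map (fun t => (Nat.cast t : Int))) k 0) (g k)) out
    = (PySem.List.pyRange ((a + 1 : Nat) : Int) (L.length : Int) 1).foldl
      (fun o2 k => PySem.List.pySetD o2 (PySem.List.pyGetD (L.map (fun t => (Nat.cast t : Int))) k 0) (g k))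
      (out.set (L[a]'ha) (g (a : Int))) := by
  rw [PySem.List.pyRange_one_cons (by exact_mod_cast ha)]
  rw [List.foldl_cons]
  have hcast : ((a : Int) + 1) = ((a + 1 : Nat) : Int) := by push_cast; ring
  rw [hcast]
  have hset : PySem.List.pySetD out (PySem.List.pyGetD (L.map (fun t => (Nat.cast t : Int))) (a : Int) 0) (g (a : Int))
      = out.set (L[a]'ha) (g (a : Int)) := by
    rw [PySem.List.pyGetD_natCast]
    rw [List.getD_eq_getElem _ _ (by simpa using ha)]
    rw [List.getElem_map]
    rw [PySem.List.pySetD_natCast]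
  rw [hset]

theorem loop_none (L : List Nat) (g : Int → String) :
    ∀ (d a : Nat) (out : List String) (j : Nat),
      L.length - a ≤ d →
      (∀ (k : Nat) (hk : k < L.length), a ≤ k → L[k] ≠ j) →
      ((PySem.List.pyRange (a : Int) (L.length : Int) 1).foldl
        (fun o2 k => PySem.List.pySetD o2 (PySem.List.pyGetD (L.map (fun t => (Nat.cast t : Int))) k 0) (g k)) out)[j]?
      = out[j]? := by
  intro d
  induction d with
  | zero =>
    intro a out j hd h
    rw [PySem.List.pyRange_one_eq_nil (by exact_mod_cast (by omega : L.length ≤ a))]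
    rfl
  | succ d ih =>
    intro a out j hd h
    by_cases ha : a < L.length
    · rw [loop_cons L g a out ha]
      rw [ih (a + 1) _ j (by omega) (fun k hk hak => h k hk (by omega))]
      rw [List.getElem?_set]
      rw [if_neg (h a ha (le_refl a))]
    · rw [PySem.List.pyRange_one_eq_nil (by exact_mod_cast (by omega : L.length ≤ a))]
      rfl

theorem loop_some (L : List Nat) (g : Int → String) :
    ∀ (d a : Nat) (out : List String) (j : Nat),
      j < out.length →
      L.length - a ≤ d →
      ∀ (k0 : Nat) (hk0 : k0 < L.length), a ≤ k0 → L[k0] = j →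
      (∀ (k : Nat) (hk : k < L.length), L[k] = j → k = k0) →
      ((PySem.List.pyRange (a : Int) (L.length : Int) 1).foldl
        (fun o2 k => PySem.List.pySetD o2 (PySem.List.pyGetD (L.map (fun t => (Nat.cast t : Int))) k 0) (g k)) out)[j]?
      = some (g (k0 : Int)) := by
  intro d
  induction d with
  | zero =>
    intro a out j hj hd k0 hk0 hak0 hLj huniq
    omega
  | succ d ih =>
    intro a out j hj hd k0 hk0 hak0 hLj huniq
    have ha : a < L.length := by omega
    rw [loop_cons L g a out ha]
    by_cases hak : a = k0
    · subst hak
      rw [loop_none L g d (a + 1) _ j (by omega)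
        (fun k hk hk1 hkj => by have := huniq k hk hkj; omega)]
      rw [hLj]
      rw [List.getElem?_set]
      rw [if_pos rfl]
      rw [if_pos (by simpa using hj)]
    · have haj : L[a]'ha ≠ j := fun hcontra => hak (huniq a ha hcontra)
      exact ih (a + 1) _ j (by simpa using hj) (by omega) k0 hk0 (by omega) hLj huniq

def grpStep (o : List String) (q : String × List Int) : List String :=
  let o1 := PySem.List.pySetD o (PySem.List.pyGetD q.2 0 0) q.1
  (PySem.List.pyRange 1 (q.2.length : Int) 1).foldl
    (fun o2 k => PySem.List.pySetD o2 (PySem.List.pyGetD q.2 k 0) (q.1 ++ "." ++ PySem.Int.toStr k)) o1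

theorem grp_length (o : List String) (q : String × List Int) : (grpStep o q).length = o.length := by
  unfold grpStep
  rw [foldl_pySetD_length _ (fun k => PySem.List.pyGetD q.2 k 0) (fun k => q.1 ++ "." ++ PySem.Int.toStr k)]
  exact PySem.List.length_pySetD ..

theorem loop_none1 (L : List Nat) (g : Int → String) (out : List String) (j : Nat)
    (h : ∀ (k : Nat) (hk : k < L.length), 1 ≤ k → L[k] ≠ j) :
    ((PySem.List.pyRange 1 (L.length : Int) 1).foldl
      (fun o2 k => PySem.List.pySetD o2 (PySem.List.pyGetD (L.map (fun t => (Nat.cast t : Int))) k 0) (g k)) out)[j]?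
    = out[j]? :=
  loop_none L g L.length 1 out j (by omega) h

theorem loop_some1 (L : List Nat) (g : Int → String) (out : List String) (j : Nat)
    (hj : j < out.length) (k0 : Nat) (hk0 : k0 < L.length) (ha : 1 ≤ k0) (hLj : L[k0] = j)
    (huniq : ∀ (k : Nat) (hk : k < L.length), L[k] = j → k = k0) :
    ((PySem.List.pyRange 1 (L.length : Int) 1).foldl
      (fun o2 k => PySem.List.pySetD o2 (PySem.List.pyGetD (L.map (fun t => (Nat.cast t : Int))) k 0) (g k)) out)[j]?
    = some (g (k0 : Int)) :=
  loop_some L g L.length 1 out j hj (by omega) k0 hk0 ha hLj huniq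

theorem grp_get (chars : List String) (ch : String) (hch : ch ∈ chars) (out : List String)
    (hout : out.length = chars.length) (j : Nat) (hj : j < chars.length) :
    (grpStep out (ch, occIdx chars ch))[j]? =
      if chars[j]? = some ch then some (labelAt (chars.take j) ch) else out[j]? := by
  have hL := occIdx_eq chars ch
  have hmpos : 0 < (occP chars ch).length := by
    rw [occP_length]; exact List.count_pos_iff.mpr hch
  unfold grpStep
  simp only [hL, List.length_map]
  have hfirst : PySem.List.pyGetD ((occP chars ch).map (fun t => (Nat.cast t : Int))) 0 0
      = (Nat.cast ((occP chars ch)[0]'hmpos) : Int) := by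
    show PySem.List.pyGetD ((occP chars ch).map (fun t => (Nat.cast t : Int))) ((0 : Nat) : Int) 0 = _
    rw [PySem.List.pyGetD_natCast, List.getD_eq_getElem _ _ (by simpa using hmpos), List.getElem_map]
  rw [hfirst, PySem.List.pySetD_natCast]
  by_cases hcj : chars[j]? = some ch
  · have hjL : j ∈ occP chars ch := occP_mem_of hj hcj
    obtain ⟨r, hr, hLr⟩ := List.getElem_of_mem hjL
    have huniq : ∀ (k : Nat) (hk : k < (occP chars ch).length), (occP chars ch)[k] = j → k = r := by
      intro k hk hkj
      have h1 := occP_spec chars ch k j (by rw [List.getElem?_eq_getElem hk, hkj])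
      have h2 := occP_spec chars ch r j (by rw [List.getElem?_eq_getElem hr, hLr])
      omega
    have hrval : (chars.take j).count ch = r :=
      (occP_spec chars ch r j (by rw [List.getElem?_eq_getElem hr, hLr])).2.2
    rw [if_pos hcj]
    by_cases hr0 : r = 0
    · subst hr0
      rw [show (occP chars ch)[0]'hmpos = j from hLr]
      rw [loop_none1 (occP chars ch) (fun k => ch ++ "." ++ PySem.Int.toStr k) _ j
        (fun k hk hk1 hkj => by have := huniq k hk hkj; omega)]
      rw [List.getElem?_set, if_pos rfl, if_pos (by omega)]
      rw [labelAt, if_pos (by omega)]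
    · rw [loop_some1 (occP chars ch) (fun k => ch ++ "." ++ PySem.Int.toStr k) _ j
        (by rw [List.length_set]; omega) r hr (by omega) hLr huniq]
      rw [labelAt, if_neg (by omega)]
      rw [hrval]
  · have hnj : ∀ (k : Nat) (hk : k < (occP chars ch).length), (occP chars ch)[k] ≠ j := by
      intro k hk hkj
      exact hcj (occP_spec chars ch k j (by rw [List.getElem?_eq_getElem hk, hkj])).2.1
    rw [if_neg hcj]
    rw [loop_none1 (occP chars ch) (fun k => ch ++ "." ++ PySem.Int.toStr k) _ j
      (fun k hk _ hkj => hnj k hk hkj)]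
    rw [List.getElem?_set, if_neg (hnj 0 hmpos)]

theorem outer_length (chars : List String) : ∀ (cs : List String) (out : List String),
    (cs.foldl (fun o c => grpStep o (c, occIdx chars c)) out).length = out.length := by
  intro cs
  induction cs with
  | nil => intro out; rfl
  | cons c cs ih => intro out; rw [List.foldl_cons, ih, grp_length]

theorem outer_get (chars : List String) : ∀ (cs : List String) (out : List String),
    out.length = chars.length → (∀ c ∈ cs, c ∈ chars) → ∀ (j : Nat) (hj : j < chars.length),
    ((cs.foldl (fun o c => grpStep o (c, occIdx chars c)) out))[j]? =
      if chars[j]'hj ∈ cs then some (labelAt (chars.take j) (chars[j]'hj)) else out[j]? := by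
  intro cs
  induction cs with
  | nil => intro out _ _ j hj; simp
  | cons c cs ih =>
    intro out hout hcs j hj
    rw [List.foldl_cons]
    rw [ih _ (by rw [grp_length]; exact hout) (fun x hx => hcs x (List.mem_cons_of_mem c hx)) j hj]
    by_cases hjcs : chars[j]'hj ∈ cs
    · rw [if_pos hjcs, if_pos (List.mem_cons_of_mem c hjcs)]
    · rw [if_neg hjcs]
      rw [grp_get chars c (hcs c List.mem_cons_self) out hout j hj]
      by_cases hje : chars[j]'hj = c
      · rw [if_pos (by rw [List.getElem?_eq_getElem hj, hje]),
          if_pos (by rw [hje]; exact List.mem_cons_self), hje]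
      · rw [if_neg (by rw [List.getElem?_eq_getElem hj]; simpa using hje),
          if_neg (by simpa [List.mem_cons] using ⟨hje, hjcs⟩)]

def occDict (chars : List String) : PySem.Dict String (List Int) :=
  (PySem.List.enumerate chars 0).foldl (fun d p => d.modify p.2 [] (fun l => l ++ [p.1]))
    PySem.Dict.empty

theorem occDict_getD (chars : List String) (ch : String) :
    (occDict chars).getD ch [] = occIdx chars ch := by
  have hswap : (PySem.List.enumerate chars 0).foldl
        (fun d p => PySem.Dict.modify d p.2 [] (fun l => l ++ [p.1])) PySem.Dict.empty
      = ((PySem.List.enumerate chars 0).map (fun p => (p.2, p.1))).foldl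
        (fun d p => PySem.Dict.modify d p.1 [] (fun l => l ++ [p.2])) PySem.Dict.empty :=
    (@List.foldl_map _ _ _ (fun p : Int × String => (p.2, p.1))
      (fun d p => PySem.Dict.modify d p.1 [] (fun l => l ++ [p.2]))
      (PySem.List.enumerate chars 0) PySem.Dict.empty).symm
  unfold occDict
  rw [hswap, PySem.Dict.getD_foldl_modify_append]
  rw [List.filter_map, List.map_map]
  rfl

theorem occDict_items (chars : List String) :
    (occDict chars).items = (PySem.Set.ofList chars).map (fun ch => (ch, occIdx chars ch)) := by
  have hkeys : (occDict chars).keys = PySem.Set.ofList chars := by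
    unfold occDict
    rw [PySem.Dict.keys_foldl_modify_key (PySem.List.enumerate chars 0) (fun p => p.2) []
      (fun d p => fun l => l ++ [p.1]) PySem.Dict.empty]
    rw [PySem.Dict.keys_empty, PySem.Set.update_nil_left, PySem.List.map_snd_enumerate]
  have hnodup : (occDict chars).keys.Nodup := by
    rw [hkeys]; exact PySem.Set.nodup_ofList chars
  rw [PySem.Dict.items_eq_map_keys _ hnodup [], hkeys]
  exact List.map_congr_left (fun ch _ => by rw [occDict_getD])
theorem a_eq_bspec (chars : List String) : unique_labels_py chars = bspec [] chars := by
  unfold unique_labels_py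
  rw [aloop chars [] PySem.Dict.empty []
    (fun ch => by simp [PySem.Dict.contains, PySem.Dict.empty])
    (fun ch h => by simp at h)]
  simp

theorem alt_eq_bspec (chars : List String) : unique_labels_py_alt chars = bspec [] chars := by
  have hB : unique_labels_py_alt chars
      = (occDict chars).items.foldl grpStep (PySem.List.pyRepeat [""] (chars.length : Int)) := rfl
  rw [hB, PySem.List.pyRepeat_singleton, Int.toNat_natCast, occDict_items, List.foldl_map]
  apply List.ext_getElem?
  intro j
  by_cases hj : j < chars.length
  · rw [outer_get chars (PySem.Set.ofList chars) _ (by simp)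
      (fun c hc => (PySem.Set.mem_ofList chars c).mp hc) j hj]
    rw [if_pos ((PySem.Set.mem_ofList chars _).mpr (List.getElem_mem hj))]
    rw [List.getElem?_eq_getElem (by rw [bspec_length]; exact hj : j < (bspec [] chars).length)]
    rw [bspec_get chars [] j hj]
    simp
  · rw [List.getElem?_eq_none (by rw [outer_length, List.length_replicate]; omega),
      List.getElem?_eq_none (by rw [bspec_length]; omega)]

-- ===== VERDICT (by name: the statement is the Claim_ definition above) =====
theorem unique_labels_py_spec : Claim_equal_unique_labels_py := by
  intro chars _
  unfold Spec_unique_labels_py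
  exact (a_eq_bspec chars).trans (alt_eq_bspec chars).symm
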